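-- pv_equiv track=rewrite | github.com/artunart/Get-Chess-Board | gcb_utils/gcb_utils.py | make_dividable
-- ===== SOURCE A (Python) =====
-- def make_dividable(low, high, groups):
--     '''Helper function to create an interval of length "high"-"low" divisible by "groups". Squeezes the interval from both sides. Returns new (low, high)'''
--     nudge_low = True
--     while (high - low) % groups !=(groups-1):
--         if nudge_low:
--             low += 1
--             nudge_low = False
--         else:
--             high -= 1
--             nudge_low = True
--     return (low, high)
-- ===== SOURCE B (Python) =====
-- def make_dividable(low, high, groups):
--     '''Closed-form: total shrink k = (high-low-(groups-1)) % groups, split ceil(k/2) onto low and floor(k/2) onto high.'''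
--     k = (high - low - (groups - 1)) % groups
--     return (low + (k + 1) // 2, high - k // 2)
-- ===== Notes on version B (the rewrite author's own statement) =====
-- stated objective: faster
-- what changed: Replaced the alternating one-step squeeze loop by a closed form: total shrink k = (high-low-(groups-1)) % groups, added as ceil(k/2) to low and floor(k/2) subtracted from high.
import Mathlib
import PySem

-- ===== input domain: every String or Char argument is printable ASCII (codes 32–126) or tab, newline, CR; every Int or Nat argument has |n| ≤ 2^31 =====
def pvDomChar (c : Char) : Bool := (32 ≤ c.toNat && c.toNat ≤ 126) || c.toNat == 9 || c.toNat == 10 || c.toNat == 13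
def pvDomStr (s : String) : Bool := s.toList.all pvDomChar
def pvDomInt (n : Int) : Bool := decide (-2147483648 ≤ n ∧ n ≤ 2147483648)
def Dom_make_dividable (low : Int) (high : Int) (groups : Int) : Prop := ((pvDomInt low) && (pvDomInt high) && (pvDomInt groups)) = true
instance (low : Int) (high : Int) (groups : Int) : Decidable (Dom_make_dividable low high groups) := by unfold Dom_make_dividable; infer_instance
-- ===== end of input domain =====

-- B replaces A's O(groups) alternating squeeze loop by an O(1) closed form.

-- ===== PORT A =====
-- A's while loop, with fuel making it total; under Pre_ (groups ≥ 1) at most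
-- groups-1 iterations run, so fuel groups.toNat is never exhausted.
def mdLoopA : Nat → Int → Int → Int → Bool → Int × Int
  | 0, low, high, _, _ => (low, high)
  | f + 1, low, high, groups, nudge_low =>
    if PySem.Int.mod (high - low) groups ≠ groups - 1 then
      if nudge_low then mdLoopA f (low + 1) high groups false
      else mdLoopA f low (high - 1) groups true
    else (low, high)

def make_dividable (low : Int) (high : Int) (groups : Int) : List Int :=
  let p := mdLoopA groups.toNat low high groups true
  [p.1, p.2]

-- ===== PORT B =====
def make_dividable_alt (low : Int) (high : Int) (groups : Int) : List Int :=
  let k := PySem.Int.mod (high - low - (groups - 1)) groups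
  [low + PySem.Int.floordiv (k + 1) 2, high - PySem.Int.floordiv k 2]

-- ===== PRECONDITION & SPEC =====
-- Pre_ excludes groups = 0 (Python A raises ZeroDivisionError) and groups < 0
-- (A's loop never terminates: the residue is then always > groups-1).
def Pre_make_dividable (low : Int) (high : Int) (groups : Int) : Prop := 1 ≤ groups
instance (low : Int) (high : Int) (groups : Int) : Decidable (Pre_make_dividable low high groups) := by unfold Pre_make_dividable; infer_instance
def pvWitness_make_dividable : Int × Int × Int := (0, 10, 3)

def Spec_make_dividable (low : Int) (high : Int) (groups : Int) (out : List Int) : Prop := out = make_dividable_alt low high groups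
instance (low : Int) (high : Int) (groups : Int) (out : List Int) : Decidable (Spec_make_dividable low high groups out) := by unfold Spec_make_dividable; infer_instance

-- ===== CLAIM (what is proved, stated in full; the proofs are below) =====
def Claim_equal_make_dividable : Prop := ∀ (low : Int) (high : Int) (groups : Int), Dom_make_dividable low high groups → Pre_make_dividable low high groups → Spec_make_dividable low high groups (make_dividable low high groups)

-- ===== LEMMAS AND PROOFS =====

-- (a+1) % g in terms of a % g, for positive g
lemma emod_succ (a g : Int) (hg : 0 < g) :
    (a + 1) % g = if a % g = g - 1 then 0 else a % g + 1 := by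
  have h0 : 0 ≤ a % g := Int.emod_nonneg a (ne_of_gt hg)
  have h1 : a % g < g := Int.emod_lt_of_pos a hg
  have key : (a + 1) % g = (a % g + 1) % g := by
    conv_lhs => rw [← Int.emod_add_mul_ediv a g]
    rw [show a % g + g * (a / g) + 1 = a % g + 1 + g * (a / g) by ring,
        Int.add_mul_emod_self_left]
  split_ifs with h
  · rw [key, h, show g - 1 + 1 = g by ring, Int.emod_self]
  · rw [key, Int.emod_eq_of_lt (by omega) (by omega)]

-- one squeeze step decrements the residue r := (high-low+1) % g when r ≠ 0
lemma emod_pred (a g : Int) (hg : 0 < g) (h : (a + 1) % g ≠ 0) :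
    a % g = (a + 1) % g - 1 := by
  rw [emod_succ a g hg] at h ⊢
  split_ifs at h ⊢ with hc
  · omega
  · omega

-- closed form of A's loop, with residue r := (high - low + 1) % g
lemma mdLoopA_eq (g : Int) (hg : 0 < g) :
    ∀ (f : Nat) (low high : Int) (nudge : Bool),
      ((high - low + 1) % g).toNat ≤ f →
      mdLoopA f low high g nudge =
        (if nudge then (low + ((high - low + 1) % g + 1) / 2, high - ((high - low + 1) % g) / 2)
         else (low + ((high - low + 1) % g) / 2, high - ((high - low + 1) % g + 1) / 2)) := by
  intro f
  induction f with
  | zero =>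
    intro low high nudge hf
    have h0 : 0 ≤ (high - low + 1) % g := Int.emod_nonneg _ (ne_of_gt hg)
    have hr : (high - low + 1) % g = 0 := by omega
    simp [mdLoopA, hr]
  | succ n ih =>
    intro low high nudge hf
    have h0 : 0 ≤ (high - low + 1) % g := Int.emod_nonneg _ (ne_of_gt hg)
    have hcond : (high - low) % g = g - 1 ↔ (high - low + 1) % g = 0 := by
      rw [emod_succ (high - low) g hg]
      have h0' : 0 ≤ (high - low) % g := Int.emod_nonneg _ (ne_of_gt hg)
      split_ifs with h <;> omega
    by_cases hr : (high - low + 1) % g = 0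
    · have : (high - low) % g = g - 1 := hcond.mpr hr
      simp [mdLoopA, PySem.Int.mod_eq_emod_of_pos hg, this, hr]
    · have hc : PySem.Int.mod (high - low) g ≠ g - 1 := by
        rw [PySem.Int.mod_eq_emod_of_pos hg]
        exact fun h => hr (hcond.mp h)
      have hstep : (high - low) % g = (high - low + 1) % g - 1 :=
        emod_pred (high - low) g hg hr
      cases nudge with
      | true =>
        have h1 : (high - (low + 1) + 1) % g = (high - low + 1) % g - 1 := by
          rw [show high - (low + 1) + 1 = high - low by ring]
          rw [show high - low = (high - low + 1) - 1 + 1 - 1 by ring] at hstep ⊢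
          simpa using hstep
        simp only [mdLoopA]
        rw [if_pos hc, ih (low + 1) high false (by omega)]
        simp only [h1, Bool.false_eq_true, if_false, if_true, Prod.mk.injEq]
        omega
      | false =>
        have h1 : (high - 1 - low + 1) % g = (high - low + 1) % g - 1 := by
          rw [show high - 1 - low + 1 = high - low by ring]
          exact hstep
        simp only [mdLoopA]
        rw [if_pos hc, ih low (high - 1) true (by omega)]
        simp only [h1, Bool.false_eq_true, if_false, if_true, Prod.mk.injEq]
        omega

-- ===== VERDICT (by name: the statement is the Claim_ definition above) =====
theorem make_dividable_spec : Claim_equal_make_dividable := by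
  intro low high groups _ hpre
  unfold Spec_make_dividable make_dividable make_dividable_alt
  have hg : (0 : Int) < groups := hpre
  have h0 : 0 ≤ (high - low + 1) % groups := Int.emod_nonneg _ (ne_of_gt hg)
  have h1 : (high - low + 1) % groups < groups := Int.emod_lt_of_pos _ hg
  rw [mdLoopA_eq groups hg groups.toNat low high true (by omega)]
  have hk : PySem.Int.mod (high - low - (groups - 1)) groups = (high - low + 1) % groups := by
    rw [PySem.Int.mod_eq_emod_of_pos hg,
        show high - low - (groups - 1) = (high - low + 1) - groups by ring,
        Int.sub_emod_right]
  simp only [hk, PySem.Int.floordiv_eq_ediv_of_pos (by norm_num : (0:Int) < 2), if_true]
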